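-- pv_equiv track=rewrite | github.com/MathusRod/SO_2 | main.py | envelhecimento
-- ===== SOURCE A (Python) =====
-- def envelhecimento(referencias, molduras, bits=8):
--     memoria = {}
--     contador = {}
--     faltas = 0
--
--     for pagina in referencias:
--         for p in contador:
--             contador[p] >>= 1
--
--         if pagina in memoria:
--             contador[pagina] |= 1 << (bits - 1)
--         else:
--             faltas += 1
--             if len(memoria) < molduras:
--                 memoria[pagina] = True
--                 contador[pagina] = 1 << (bits - 1)
--             else:
--                 menos_usada = min(contador, key=contador.get)
--                 del memoria[menos_usada]
--                 del contador[menos_usada]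
--                 memoria[pagina] = True
--                 contador[pagina] = 1 << (bits - 1)
--     return faltas
-- ===== SOURCE B (Python) =====
-- def envelhecimento(referencias, molduras, bits=8):
--     # Lazy aging: instead of shifting every frame's counter on every reference,
--     # store (counter_value, step_when_last_set) per resident page and apply the
--     # pending shifts only when the counter is actually read (hit or eviction scan).
--     store = {}  # page -> (counter value at that step, step index when set)
--     faltas = 0
--     for t, pagina in enumerate(referencias):
--         if pagina in store:
--             v, s = store[pagina]
--             store[pagina] = ((v >> (t - s)) | (1 << (bits - 1)), t)
--         else:
--             faltas += 1
--             if len(store) >= molduras: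
--                 victim = min(store, key=lambda p: store[p][0] >> (t - store[p][1]))
--                 del store[victim]
--             store[pagina] = (1 << (bits - 1), t)
--     return faltas
-- ===== Notes on version B (the rewrite author's own statement) =====
-- stated objective: alternative
-- what changed: B replaces A's per-reference right-shift of every resident counter (and the memoria/contador dict pair) by lazy aging in a single dict: each page stores (counter value, step when last set) and the pending shifts are applied only when that counter is actually read, so a hit touches one entry instead of every frame.
import Mathlib
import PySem

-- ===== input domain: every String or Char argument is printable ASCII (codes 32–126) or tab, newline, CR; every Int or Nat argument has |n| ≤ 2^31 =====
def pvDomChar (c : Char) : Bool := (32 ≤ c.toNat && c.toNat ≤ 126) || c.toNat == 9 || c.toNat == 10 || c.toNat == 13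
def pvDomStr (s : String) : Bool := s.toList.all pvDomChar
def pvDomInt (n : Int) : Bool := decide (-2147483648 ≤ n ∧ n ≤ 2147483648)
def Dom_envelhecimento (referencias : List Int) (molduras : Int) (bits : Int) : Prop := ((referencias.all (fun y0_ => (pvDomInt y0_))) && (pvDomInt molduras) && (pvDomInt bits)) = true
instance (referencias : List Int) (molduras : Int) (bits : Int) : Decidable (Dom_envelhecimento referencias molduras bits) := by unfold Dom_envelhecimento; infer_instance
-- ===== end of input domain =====

-- B replaces A's per-reference shift of EVERY resident counter (and A's memoria/contador dict pair)
-- by lazy aging in one dict: each page keeps (counter, last-touch step), normalized only when read.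

-- ===== PORT A =====
-- one iteration of A's 'for pagina in referencias' loop; state = (memoria, contador, faltas)
def envStepA (molduras : Int) (bits : Int)
    (st : PySem.Dict Int Bool × PySem.Dict Int Int × Int) (pagina : Int) :
    PySem.Dict Int Bool × PySem.Dict Int Int × Int :=
  let memoria := st.1
  let contador := st.2.1
  let faltas := st.2.2
  -- 'for p in contador: contador[p] >>= 1' : every stored counter is halved in place
  let contador := PySem.Dict.mk (contador.items.map (fun pc : Int × Int => (pc.1, pc.2 >>> (1:Nat))))
  if memoria.contains pagina then
    -- contador[pagina] |= 1 << (bits - 1)   ((bits-1).toNat: Python raises on bits ≤ 0, excluded by Pre_)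
    (memoria, contador.modify pagina 0 (fun c => PySem.Int.bor c ((1 : Int) <<< (bits - 1).toNat)), faltas)
  else
    let faltas := faltas + 1
    if (memoria.size : Int) < molduras then
      (memoria.insert pagina true, contador.insert pagina ((1 : Int) <<< (bits - 1).toNat), faltas)
    else
      -- min(contador, key=contador.get); '.getD 0': min over an empty dict raises in Python, excluded by Pre_
      let menos := (PySem.List.min? contador.keys (fun p => contador.getD p 0)).getD 0
      ((memoria.erase menos).insert pagina true,
       (contador.erase menos).insert pagina ((1 : Int) <<< (bits - 1).toNat), faltas)

def envelhecimento (referencias : List Int) (molduras : Int) (bits : Int) : Int :=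
  (referencias.foldl (envStepA molduras bits) (PySem.Dict.empty, PySem.Dict.empty, 0)).2.2

-- ===== PORT B =====
-- one iteration of B's 'for t, pagina in enumerate(referencias)'; state = (store, faltas)
def envStepB (molduras : Int) (bits : Int)
    (st : PySem.Dict Int (Int × Int) × Int) (tp : Int × Int) :
    PySem.Dict Int (Int × Int) × Int :=
  let store := st.1
  let faltas := st.2
  let t := tp.1
  let pagina := tp.2
  match store.get? pagina with
  | some vs =>
      -- store[pagina] = ((v >> (t - s)) | (1 << (bits - 1)), t)  (t ≥ s in every reachable state)
      (store.insert pagina (PySem.Int.bor (vs.1 >>> (t - vs.2).toNat) ((1 : Int) <<< (bits - 1).toNat), t), faltas)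
  | none =>
      let faltas := faltas + 1
      if molduras ≤ (store.size : Int) then
        -- min(store, key=lambda p: store[p][0] >> (t - store[p][1])); '.getD 0': empty min raises, excluded by Pre_
        let victim := (PySem.List.min? store.keys
            (fun p => (store.getD p (0, 0)).1 >>> (t - (store.getD p (0, 0)).2).toNat)).getD 0
        ((store.erase victim).insert pagina ((1 : Int) <<< (bits - 1).toNat, t), faltas)
      else
        (store.insert pagina ((1 : Int) <<< (bits - 1).toNat, t), faltas)

def envelhecimento_alt (referencias : List Int) (molduras : Int) (bits : Int) : Int :=
  ((PySem.List.enumerate referencias).foldl (envStepB molduras bits) (PySem.Dict.empty, 0)).2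

-- ===== PRECONDITION & SPEC =====
-- Pre_ excludes exactly the inputs on which Python A raises (min() of an empty dict when
-- molduras ≤ 0, or a negative shift count 'bits - 1 < 0'); B raises there too.
def Pre_envelhecimento (referencias : List Int) (molduras : Int) (bits : Int) : Prop :=
  referencias = [] ∨ (0 < molduras ∧ 1 ≤ bits)
instance (referencias : List Int) (molduras : Int) (bits : Int) : Decidable (Pre_envelhecimento referencias molduras bits) := by unfold Pre_envelhecimento; infer_instance

def pvWitness_envelhecimento : List Int × Int × Int := ([1, 2, 1, 3, 2, 4, 1], 2, 8)

def Spec_envelhecimento (referencias : List Int) (molduras : Int) (bits : Int) (out : Int) : Prop := out = envelhecimento_alt referencias molduras bits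
instance (referencias : List Int) (molduras : Int) (bits : Int) (out : Int) : Decidable (Spec_envelhecimento referencias molduras bits out) := by unfold Spec_envelhecimento; infer_instance

-- ===== CLAIM (what is proved, stated in full; the proofs are below) =====
def Claim_equal_envelhecimento : Prop := ∀ (referencias : List Int) (molduras : Int) (bits : Int), Dom_envelhecimento referencias molduras bits → Pre_envelhecimento referencias molduras bits → Spec_envelhecimento referencias molduras bits (envelhecimento referencias molduras bits)

-- ===== LEMMAS AND PROOFS =====

-- B's entry (v, s) read at step t denotes the aged counter v >>> (t - s)
def effP (t : Int) (q : Int × (Int × Int)) : Int × Int := (q.1, q.2.1 >>> (t - q.2.2).toNat)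

-- coupling invariant at the loop boundary before processing index t
def EnvInv (t : Int) (memoria : PySem.Dict Int Bool) (contador : PySem.Dict Int Int)
    (store : PySem.Dict Int (Int × Int)) : Prop :=
  memoria.items = store.items.map (fun q => (q.1, true)) ∧
  contador.items = store.items.map (effP (t - 1)) ∧
  ∀ q ∈ store.items, q.2.2 ≤ t - 1

lemma items_mk {ν : Type} (l : List (Int × ν)) : (PySem.Dict.mk l).items = l := rfl

lemma find?_effP (L : List (Int × (Int × Int))) (t k : Int) :
    List.find? (fun p => p.1 == k) (L.map (effP t))
      = (List.find? (fun p => p.1 == k) L).map (effP t) := by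
  rw [List.find?_map]; rfl

lemma envStep_rel (molduras bits t pagina f : Int)
    (memoria : PySem.Dict Int Bool) (contador : PySem.Dict Int Int)
    (store : PySem.Dict Int (Int × Int)) (h : EnvInv t memoria contador store) :
    EnvInv (t + 1) (envStepA molduras bits (memoria, contador, f) pagina).1
        (envStepA molduras bits (memoria, contador, f) pagina).2.1
        (envStepB molduras bits (store, f) (t, pagina)).1 ∧
      (envStepA molduras bits (memoria, contador, f) pagina).2.2
        = (envStepB molduras bits (store, f) (t, pagina)).2 := by
  obtain ⟨hm, hc, hs⟩ := h
  set L := store.items with hL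
  set topbit : Int := (1 : Int) <<< (bits - 1).toNat with htop
  -- the freshly shifted contador of A equals the lazily-aged view of B's store at time t
  have hshift : contador.items.map (fun pc : Int × Int => (pc.1, pc.2 >>> (1:Nat)))
      = L.map (effP t) := by
    rw [hc, List.map_map]
    refine List.map_congr_left ?_
    intro q hq
    have hb := hs q hq
    have h1 : (t - q.2.2).toNat = (t - 1 - q.2.2).toNat + 1 := by omega
    simp only [Function.comp, effP, h1, Int.shiftRight_add]
  have hmemc : memoria.contains pagina
      = (List.find? (fun p => p.1 == pagina) L).isSome := by
    rcases hfind : List.find? (fun p => p.1 == pagina) L with _ | q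
    · simp only [PySem.Dict.contains, hm, List.any_map, hfind, Option.isSome_none]
      refine List.any_eq_false.mpr ?_
      intro q hq
      simpa [Function.comp] using List.find?_eq_none.mp hfind q hq
    · simp only [PySem.Dict.contains, hm, List.any_map, hfind, Option.isSome_some]
      refine List.any_eq_true.mpr ⟨q, List.mem_of_find?_eq_some hfind, ?_⟩
      simpa [Function.comp] using List.find?_some hfind
  rcases hfind : List.find? (fun p => p.1 == pagina) L with _ | q₀
  · -- MISS: pagina not resident in either simulation
    have hnotin : ∀ q ∈ L, ¬(q.1 == pagina) = true := List.find?_eq_none.mp hfind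
    have hgetB : store.get? pagina = none := by
      simp only [PySem.Dict.get?, ← hL, hfind, Option.map_none]
    have hcm : memoria.contains pagina = false := by rw [hmemc, hfind]; rfl
    have hsize : memoria.size = L.length := by
      simp only [PySem.Dict.size, hm, List.length_map]
    have hcontStore : store.contains pagina = false := by
      simp only [PySem.Dict.contains, ← hL]
      exact List.any_eq_false.mpr hnotin
    by_cases hlt : (L.length : Int) < molduras
    · -- a free frame: both append the new page
      have hA : envStepA molduras bits (memoria, contador, f) pagina
          = (memoria.insert pagina true,
             (PySem.Dict.mk (contador.items.map (fun pc : Int × Int => (pc.1, pc.2 >>> (1:Nat))))).insert pagina topbit,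
             f + 1) := by
        simp only [envStepA, hcm, Bool.false_eq_true, if_false, hsize, hlt, if_true, htop]
      have hB : envStepB molduras bits (store, f) (t, pagina)
          = (store.insert pagina (topbit, t), f + 1) := by
        have : ¬ molduras ≤ (store.size : Int) := by
          simp only [PySem.Dict.size, ← hL]; omega
        simp only [envStepB, hgetB, this, if_false, htop]
      rw [hA, hB]
      have hcontC : (PySem.Dict.mk (contador.items.map (fun pc : Int × Int => (pc.1, pc.2 >>> (1:Nat))))).contains pagina = false := by
        simp only [PySem.Dict.contains, hshift, List.any_map]
        exact List.any_eq_false.mpr hnotin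
      refine ⟨⟨?_, ?_, ?_⟩, rfl⟩
      · rw [PySem.Dict.items_insert_of_not_contains _ _ hcm,
            PySem.Dict.items_insert_of_not_contains _ _ hcontStore, hm, ← hL, List.map_append]
        rfl
      · rw [show t + 1 - 1 = t from by ring,
            PySem.Dict.items_insert_of_not_contains _ _ hcontC,
            PySem.Dict.items_insert_of_not_contains _ _ hcontStore, items_mk, hshift, ← hL,
            List.map_append]
        simp [effP, Int.shiftRight_zero]
      · rw [PySem.Dict.items_insert_of_not_contains _ _ hcontStore, ← hL]
        intro q hq
        rcases List.mem_append.mp hq with hq | hq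
        · have := hs q hq; omega
        · simp only [List.mem_singleton] at hq; subst hq; dsimp only; omega
    · -- eviction: both pick the same least-counter victim, then append
      have hkeyfun : (fun p => (PySem.Dict.mk (contador.items.map (fun pc : Int × Int => (pc.1, pc.2 >>> (1:Nat))))).getD p 0)
          = (fun p => (store.getD p (0, 0)).1 >>> (t - (store.getD p (0, 0)).2).toNat) := by
        funext p
        simp only [PySem.Dict.getD, PySem.Dict.get?, hshift, ← hL, find?_effP]
        rcases hf : List.find? (fun q => q.1 == p) L with _ | q₁
        · rw [hf]; simp [Int.zero_shiftRight]
        · rw [hf]; simp [effP]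
      have hkeys : (PySem.Dict.mk (contador.items.map (fun pc : Int × Int => (pc.1, pc.2 >>> (1:Nat))))).keys = store.keys := by
        simp only [PySem.Dict.keys, hshift, ← hL, List.map_map]; rfl
      set menos := (PySem.List.min? store.keys
          (fun p => (store.getD p (0, 0)).1 >>> (t - (store.getD p (0, 0)).2).toNat)).getD 0 with hmenos
      have hA : envStepA molduras bits (memoria, contador, f) pagina
          = ((memoria.erase menos).insert pagina true,
             ((PySem.Dict.mk (contador.items.map (fun pc : Int × Int => (pc.1, pc.2 >>> (1:Nat))))).erase menos).insert pagina topbit,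
             f + 1) := by
        simp only [envStepA, hcm, Bool.false_eq_true, if_false, hsize, hlt, htop,
          hkeyfun, hkeys, hmenos]
      have hB : envStepB molduras bits (store, f) (t, pagina)
          = ((store.erase menos).insert pagina (topbit, t), f + 1) := by
        have hge : molduras ≤ (store.size : Int) := by
          simp only [PySem.Dict.size, ← hL]; omega
        simp only [envStepB, hgetB, hge, if_true, htop, hmenos]
      rw [hA, hB]
      have hememc : (memoria.erase menos).items = (L.filter (fun q => !(q.1 == menos))).map (fun q => (q.1, true)) := by
        simp only [PySem.Dict.erase, hm, List.filter_map]; rfl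
      have herasC : ((PySem.Dict.mk (contador.items.map (fun pc : Int × Int => (pc.1, pc.2 >>> (1:Nat))))).erase menos).items
          = (L.filter (fun q => !(q.1 == menos))).map (effP t) := by
        simp only [PySem.Dict.erase, hshift, List.filter_map]; rfl
      have herasS : (store.erase menos).items = L.filter (fun q => !(q.1 == menos)) := by
        simp only [PySem.Dict.erase, ← hL]
      have hnotinF : ∀ q ∈ L.filter (fun q => !(q.1 == menos)), ¬(q.1 == pagina) = true := by
        intro q hq; exact hnotin q (List.mem_of_mem_filter hq)
      have hcm' : (memoria.erase menos).contains pagina = false := by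
        simp only [PySem.Dict.contains, hememc, List.any_map]
        exact List.any_eq_false.mpr hnotinF
      have hcc' : ((PySem.Dict.mk (contador.items.map (fun pc : Int × Int => (pc.1, pc.2 >>> (1:Nat))))).erase menos).contains pagina = false := by
        simp only [PySem.Dict.contains, herasC, List.any_map]
        exact List.any_eq_false.mpr hnotinF
      have hcs' : (store.erase menos).contains pagina = false := by
        simp only [PySem.Dict.contains, herasS]
        exact List.any_eq_false.mpr hnotinF
      refine ⟨⟨?_, ?_, ?_⟩, rfl⟩
      · rw [PySem.Dict.items_insert_of_not_contains _ _ hcm',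
            PySem.Dict.items_insert_of_not_contains _ _ hcs', hememc, herasS, List.map_append]
        rfl
      · rw [show t + 1 - 1 = t from by ring,
            PySem.Dict.items_insert_of_not_contains _ _ hcc',
            PySem.Dict.items_insert_of_not_contains _ _ hcs', herasC, herasS, List.map_append]
        simp [effP, Int.shiftRight_zero]
      · rw [PySem.Dict.items_insert_of_not_contains _ _ hcs', herasS]
        intro q hq
        rcases List.mem_append.mp hq with hq | hq
        · have := hs q (List.mem_of_mem_filter hq); omega
        · simp only [List.mem_singleton] at hq; subst hq; dsimp only; omega
  · -- HIT: pagina resident; A refreshes the counter, B normalizes and stamps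
    have hq₀ : q₀.1 = pagina := by
      have hb : (q₀.1 == pagina) = true := by simpa using List.find?_some hfind
      exact eq_of_beq hb
    have hgetB : store.get? pagina = some q₀.2 := by
      simp only [PySem.Dict.get?, ← hL, hfind, Option.map_some]
    have hcm : memoria.contains pagina = true := by rw [hmemc, hfind]; rfl
    have hgC : (PySem.Dict.mk (contador.items.map (fun pc : Int × Int => (pc.1, pc.2 >>> (1:Nat))))).getD pagina 0
        = q₀.2.1 >>> (t - q₀.2.2).toNat := by
      simp only [PySem.Dict.getD, PySem.Dict.get?, hshift, find?_effP, hfind]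
      simp [effP]
    have hcontC : (PySem.Dict.mk (contador.items.map (fun pc : Int × Int => (pc.1, pc.2 >>> (1:Nat))))).contains pagina = true := by
      simp only [PySem.Dict.contains, hshift, List.any_map]
      refine List.any_eq_true.mpr ⟨q₀, List.mem_of_find?_eq_some hfind, ?_⟩
      simpa using List.find?_some hfind
    have hcontS : store.contains pagina = true := by
      simp only [PySem.Dict.contains, ← hL]
      refine List.any_eq_true.mpr ⟨q₀, List.mem_of_find?_eq_some hfind, ?_⟩
      simpa using List.find?_some hfind
    set newv : Int := PySem.Int.bor (q₀.2.1 >>> (t - q₀.2.2).toNat) topbit with hnewv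
    have hA : envStepA molduras bits (memoria, contador, f) pagina
        = (memoria,
           (PySem.Dict.mk (contador.items.map (fun pc : Int × Int => (pc.1, pc.2 >>> (1:Nat))))).insert pagina newv,
           f) := by
      simp only [envStepA, hcm, if_true, PySem.Dict.modify, hgC, htop, hnewv]
    have hB : envStepB molduras bits (store, f) (t, pagina)
        = (store.insert pagina (newv, t), f) := by
      simp only [envStepB, hgetB, htop, hnewv]
    rw [hA, hB]
    have hitemsS : (store.insert pagina (newv, t)).items
        = L.map (fun p => if p.1 == pagina then (pagina, (newv, t)) else p) := by
      rw [PySem.Dict.items_insert_of_contains _ _ hcontS]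
    have ht : t + 1 - 1 = t := by ring
    refine ⟨⟨?_, ?_, ?_⟩, rfl⟩
    · rw [hitemsS, hm, List.map_map]
      refine (List.map_congr_left ?_).symm
      intro q hq
      by_cases hqq : q.1 = pagina <;> simp [Function.comp, hqq]
    · rw [ht, PySem.Dict.items_insert_of_contains _ _ hcontC, items_mk, hshift, hitemsS,
        List.map_map, List.map_map]
      refine List.map_congr_left ?_
      intro q hq
      by_cases hqq : q.1 = pagina <;>
        simp [Function.comp, effP, hqq, Int.shiftRight_zero]
    · rw [hitemsS]
      intro q hq
      rcases List.mem_map.mp hq with ⟨q', hq', hq'eq⟩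
      by_cases hqq : q'.1 = pagina
      · simp only [hqq, beq_self_eq_true, if_true] at hq'eq
        subst hq'eq; dsimp only; omega
      · simp only [beq_eq_false_iff_ne.mpr hqq, Bool.false_eq_true, if_false] at hq'eq
        subst hq'eq; have := hs q' hq'; omega

lemma envLoop_rel (molduras bits : Int) (rest : List Int) :
    ∀ (t f : Int) (memoria : PySem.Dict Int Bool) (contador : PySem.Dict Int Int)
      (store : PySem.Dict Int (Int × Int)), EnvInv t memoria contador store →
      (rest.foldl (envStepA molduras bits) (memoria, contador, f)).2.2
        = ((PySem.List.enumerate rest t).foldl (envStepB molduras bits) (store, f)).2 := by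
  induction rest with
  | nil => intro t f memoria contador store _; rfl
  | cons x xs ih =>
    intro t f memoria contador store h
    rw [PySem.List.enumerate_cons, List.foldl_cons, List.foldl_cons]
    obtain ⟨hinv, hf⟩ := envStep_rel molduras bits t x f memoria contador store h
    have hA : envStepA molduras bits (memoria, contador, f) x
        = ((envStepA molduras bits (memoria, contador, f) x).1,
           (envStepA molduras bits (memoria, contador, f) x).2.1,
           (envStepA molduras bits (memoria, contador, f) x).2.2) := rfl
    have hB : envStepB molduras bits (store, f) (t, x)
        = ((envStepB molduras bits (store, f) (t, x)).1,
           (envStepA molduras bits (memoria, contador, f) x).2.2) := by rw [hf]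
    rw [hA, hB]
    exact ih (t + 1) _ _ _ _ hinv

-- ===== VERDICT (by name: the statement is the Claim_ definition above) =====
theorem envelhecimento_spec : Claim_equal_envelhecimento := by
  intro referencias molduras bits _ _
  unfold Spec_envelhecimento envelhecimento envelhecimento_alt
  exact envLoop_rel molduras bits referencias 0 0 _ _ _ ⟨rfl, rfl, by simp [PySem.Dict.empty]⟩
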